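-- pv_equiv track=rewrite | github.com/michaljbarczewski/red-channel_manager | cogs/channel_manager.py | find_free_numbers
-- ===== SOURCE A (Python) =====
-- def find_free_numbers(numbers, n_to_find):
--     free_numbers = []
--     max_num = max(numbers)
--     for i in range(1, max_num):
--        if (i not in numbers):
--            free_numbers.append(i)
--     n_found = len(free_numbers)
--     for i in range(0,n_to_find - n_found):
--        free_numbers.append(max_num+i+1)
--
--     return free_numbers
-- ===== SOURCE B (Python) =====
-- def find_free_numbers(numbers, n_to_find):
--     max_num = max(numbers)
--     free_numbers = []
--     candidate = 1
--     for v in sorted(numbers):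
--         if candidate <= v < max_num:
--             free_numbers.extend(range(candidate, v))
--             candidate = v + 1
--     free_numbers.extend(range(candidate, max_num))
--     pad = n_to_find - len(free_numbers)
--     if pad > 0:
--         free_numbers.extend(range(max_num + 1, max_num + 1 + pad))
--     return free_numbers
-- ===== Notes on version B (the rewrite author's own statement) =====
-- stated objective: faster
-- what changed: Replaces the quadratic scan (for each i in 1..max a linear 'i in numbers' membership test) by sorting numbers once and walking the sorted list with a moving candidate pointer, emitting whole gaps range(candidate, v) at a time; duplicates/non-positive values are skipped because they fall below the candidate.
import Mathlib
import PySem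

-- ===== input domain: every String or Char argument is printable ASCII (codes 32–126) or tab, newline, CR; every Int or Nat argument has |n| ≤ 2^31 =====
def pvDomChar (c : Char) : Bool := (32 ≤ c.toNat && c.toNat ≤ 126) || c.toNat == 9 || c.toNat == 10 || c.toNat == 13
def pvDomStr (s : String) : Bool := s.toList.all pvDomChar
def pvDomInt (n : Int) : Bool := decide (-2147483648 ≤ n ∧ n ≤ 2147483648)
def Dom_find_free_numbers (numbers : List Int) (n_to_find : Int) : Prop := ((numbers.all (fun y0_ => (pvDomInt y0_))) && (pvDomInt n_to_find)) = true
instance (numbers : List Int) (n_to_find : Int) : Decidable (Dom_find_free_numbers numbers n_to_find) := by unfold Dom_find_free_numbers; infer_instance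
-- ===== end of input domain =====

-- B replaces A's scan of every integer in [1, max) with a membership test per integer by one
-- sort of `numbers` plus a single gap-emitting walk (objective: faster).

-- ===== PORT A =====
-- literal port of A; the `none` branch is unreachable under Pre_ (Python raises ValueError on max([])).
def find_free_numbers (numbers : List Int) (n_to_find : Int) : List Int :=
  match PySem.List.max? numbers (fun x => x) with
  | none => []
  | some max_num =>
    let free_numbers :=
      (PySem.List.pyRange 1 max_num).foldl
        (fun acc i => if i ∈ numbers then acc else acc ++ [i]) []
    let n_found : Int := free_numbers.length
    (PySem.List.pyRange 0 (n_to_find - n_found)).foldl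
      (fun acc i => acc ++ [max_num + i + 1]) free_numbers

-- ===== PORT B =====
-- literal port of Source B; the loop's two mutable variables (free_numbers, candidate) are the fold state.
def find_free_numbers_alt (numbers : List Int) (n_to_find : Int) : List Int :=
  match PySem.List.max? numbers (fun x => x) with
  | none => []
  | some max_num =>
    let st :=
      (PySem.List.sorted numbers (fun x => x)).foldl
        (fun (st : List Int × Int) v =>
          if st.2 ≤ v ∧ v < max_num then (st.1 ++ PySem.List.pyRange st.2 v, v + 1) else st)
        ([], 1)
    let free_numbers := st.1 ++ PySem.List.pyRange st.2 max_num
    let pad := n_to_find - (free_numbers.length : Int)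
    if 0 < pad then free_numbers ++ PySem.List.pyRange (max_num + 1) (max_num + 1 + pad)
    else free_numbers

-- ===== PRECONDITION & SPEC =====
-- Pre_ excludes only the empty list, on which Python's max([]) raises ValueError (in both A and B).
def Pre_find_free_numbers (numbers : List Int) (n_to_find : Int) : Prop := numbers ≠ []
instance (numbers : List Int) (n_to_find : Int) : Decidable (Pre_find_free_numbers numbers n_to_find) := by unfold Pre_find_free_numbers; infer_instance
def pvWitness_find_free_numbers : List Int × Int := ([2, 5, 2], 4)

def Spec_find_free_numbers (numbers : List Int) (n_to_find : Int) (out : List Int) : Prop := out = find_free_numbers_alt numbers n_to_find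
instance (numbers : List Int) (n_to_find : Int) (out : List Int) : Decidable (Spec_find_free_numbers numbers n_to_find out) := by unfold Spec_find_free_numbers; infer_instance

-- ===== CLAIM (what is proved, stated in full; the proofs are below) =====
def Claim_equal_find_free_numbers : Prop := ∀ (numbers : List Int) (n_to_find : Int), Dom_find_free_numbers numbers n_to_find → Pre_find_free_numbers numbers n_to_find → Spec_find_free_numbers numbers n_to_find (find_free_numbers numbers n_to_find)

-- ===== LEMMAS AND PROOFS =====

-- A's first loop is a filter of the range.
theorem foldA_eq_filter (numbers : List Int) (l : List Int) (acc : List Int) :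
    l.foldl (fun acc i => if i ∈ numbers then acc else acc ++ [i]) acc
      = acc ++ l.filter (fun i => decide (i ∉ numbers)) := by
  induction l generalizing acc with
  | nil => simp
  | cons x t ih =>
    simp only [List.foldl_cons, List.filter_cons]
    by_cases hx : x ∈ numbers <;> simp [hx, ih]

-- B's walk over a sorted sublist of `numbers` produces exactly the filtered range.
theorem walk_eq_filter (numbers : List Int) (m : Int) (s : List Int) :
    ∀ (acc : List Int) (cand : Int),
    s.Pairwise (· ≤ ·) →
    (∀ v ∈ s, v ∈ numbers) →
    (∀ x : Int, cand ≤ x → x < m → (x ∈ numbers ↔ x ∈ s)) →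
    (let st := s.foldl
        (fun (st : List Int × Int) v =>
          if st.2 ≤ v ∧ v < m then (st.1 ++ PySem.List.pyRange st.2 v, v + 1) else st)
        (acc, cand);
     st.1 ++ PySem.List.pyRange st.2 m)
      = acc ++ (PySem.List.pyRange cand m).filter (fun i => decide (i ∉ numbers)) := by
  induction s with
  | nil =>
    intro acc cand _ _ hinv
    simp only [List.foldl_nil]
    have : (PySem.List.pyRange cand m).filter (fun i => decide (i ∉ numbers))
        = PySem.List.pyRange cand m := by
      apply List.filter_eq_self.mpr
      intro x hx
      rw [PySem.List.mem_pyRange_one] at hx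
      simp only [decide_eq_true_eq]
      intro hmem
      exact (List.not_mem_nil (a := x)) ((hinv x hx.1 hx.2).mp hmem)
    rw [this]
  | cons v t ih =>
    intro acc cand hpw hsub hinv
    have hpw' := (List.pairwise_cons.mp hpw)
    simp only [List.foldl_cons]
    by_cases h : cand ≤ v ∧ v < m
    · simp only [if_pos h]
      have ihres := ih (acc ++ PySem.List.pyRange cand v) (v + 1) hpw'.2
        (fun w hw => hsub w (List.mem_cons_of_mem _ hw))
        (by
          intro x hx1 hx2
          constructor
          · intro hxn
            have := (hinv x (le_trans h.1 (by omega)) hx2).mp hxn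
            rcases List.mem_cons.mp this with h' | h'
            · omega
            · exact h'
          · intro hxs
            exact (hinv x (le_trans h.1 (by omega)) hx2).mpr (List.mem_cons_of_mem _ hxs))
      simp only at ihres
      rw [ihres]
      have hsplit : PySem.List.pyRange cand m
          = PySem.List.pyRange cand v ++ PySem.List.pyRange v m :=
        PySem.List.pyRange_one_append cand v m h.1 (le_of_lt h.2)
      have hcons : PySem.List.pyRange v m = v :: PySem.List.pyRange (v + 1) m :=
        PySem.List.pyRange_one_cons h.2
      have hfirst : (PySem.List.pyRange cand v).filter (fun i => decide (i ∉ numbers))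
          = PySem.List.pyRange cand v := by
        apply List.filter_eq_self.mpr
        intro x hx
        rw [PySem.List.mem_pyRange_one] at hx
        simp only [decide_eq_true_eq]
        intro hmem
        have := (hinv x hx.1 (lt_trans hx.2 h.2)).mp hmem
        rcases List.mem_cons.mp this with h' | h'
        · omega
        · exact absurd (hpw'.1 x h') (by omega)
      have hvmem : v ∈ numbers := hsub v (List.mem_cons_self)
      rw [hsplit, List.filter_append, hfirst, hcons, List.filter_cons]
      simp [hvmem, List.append_assoc]
    · simp only [if_neg h]
      exact ih acc cand hpw'.2
        (fun w hw => hsub w (List.mem_cons_of_mem _ hw))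
        (by
          intro x hx1 hx2
          constructor
          · intro hxn
            rcases List.mem_cons.mp ((hinv x hx1 hx2).mp hxn) with h' | h'
            · exfalso; apply h; omega
            · exact h'
          · intro hxs
            exact (hinv x hx1 hx2).mpr (List.mem_cons_of_mem _ hxs))

-- the padding tails agree.
theorem pad_eq (m pad : Int) :
    (PySem.List.pyRange 0 pad).map (fun i => m + i + 1)
      = PySem.List.pyRange (m + 1) (m + 1 + pad) := by
  rw [PySem.List.pyRange_one, PySem.List.pyRange_one, List.map_map]
  have : (m + 1 + pad - (m + 1)).toNat = (pad - 0).toNat := by omega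
  rw [this]
  apply List.map_congr_left
  intro k _
  simp only [Function.comp_apply]
  omega

theorem find_free_numbers_spec : Claim_equal_find_free_numbers := by
  intro numbers n_to_find _ hpre
  unfold Spec_find_free_numbers
  cases hm : PySem.List.max? numbers (fun x => x) with
  | none => exact absurd ((PySem.List.max?_eq_none_iff numbers (fun x => x)).mp hm) hpre
  | some m =>
    simp only [find_free_numbers, find_free_numbers_alt, hm]
    have hA := foldA_eq_filter numbers (PySem.List.pyRange 1 m) []
    have hB := walk_eq_filter numbers m (PySem.List.sorted numbers (fun x => x)) [] 1
      (by simpa using PySem.List.sorted_pairwise numbers (fun x => x))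
      (fun v hv => (PySem.List.mem_sorted numbers (fun x => x) false v).mp hv)
      (fun x _ _ => (PySem.List.mem_sorted numbers (fun x => x) false x).symm)
    simp only at hB
    rw [List.nil_append] at hA
    rw [List.nil_append] at hB
    rw [hA, hB]
    rw [PySem.List.foldl_append_singleton_eq_map (fun i => m + i + 1)]
    set F := (PySem.List.pyRange 1 m).filter (fun i => decide (i ∉ numbers)) with hF
    set pad := n_to_find - (F.length : Int) with hpad
    by_cases hp : 0 < pad
    · rw [if_pos hp, pad_eq]
    · rw [if_neg hp]
      have : PySem.List.pyRange 0 pad = [] := PySem.List.pyRange_one_eq_nil (by omega)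
      simp [this]

-- ===== VERDICT (by name: the statement is the Claim_ definition above) =====
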